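-- pv_equiv track=rewrite | github.com/OraingeWZC/Trace_mcp | app/tools/trace_sv_diag/utils.py | enforce_dag_parent
-- ===== SOURCE A (Python) =====
-- from typing import Dict, List, Tuple, Optional
--
-- def enforce_dag_parent(parent: List[int]) -> List[int]:
--     parent = list(parent)
--     n = len(parent)
--     state = [0]*n  # 0=unseen,1=visiting,2=done
--     def dfs(u):
--         state[u] = 1
--         p = parent[u]
--         if p >= 0:
--             if state[p] == 0:
--                 dfs(p)
--             elif state[p] == 1:
--                 parent[u] = -1
--         state[u] = 2
--     for u in range(n):
--         if state[u] == 0: dfs(u)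
--     return parent
-- ===== SOURCE B (Python) =====
-- def enforce_dag_parent(parent):
--     res = list(parent)
--     n = len(res)
--     done = set()
--     for u in range(n):
--         if u in done:
--             continue
--         path = []
--         onpath = set()
--         v = u
--         cut = None
--         while True:
--             path.append(v)
--             onpath.add(v)
--             p = res[v]
--             if p < 0:
--                 break
--             if p in onpath:
--                 cut = v
--                 break
--             if p in done:
--                 break
--             v = p
--         if cut is not None:
--             res[cut] = -1
--         done.update(path)
--     return res
-- ===== Notes on version B (the rewrite author's own statement) =====
-- stated objective: alternative
-- what changed: A's mutating tri-state recursive DFS is replaced by an iterative walk that only reads the parent array: it collects the current chain into a path list and an on-path set, records the cut point in an optional, and applies the cut and the done-set update after the walk.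
import Mathlib
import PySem

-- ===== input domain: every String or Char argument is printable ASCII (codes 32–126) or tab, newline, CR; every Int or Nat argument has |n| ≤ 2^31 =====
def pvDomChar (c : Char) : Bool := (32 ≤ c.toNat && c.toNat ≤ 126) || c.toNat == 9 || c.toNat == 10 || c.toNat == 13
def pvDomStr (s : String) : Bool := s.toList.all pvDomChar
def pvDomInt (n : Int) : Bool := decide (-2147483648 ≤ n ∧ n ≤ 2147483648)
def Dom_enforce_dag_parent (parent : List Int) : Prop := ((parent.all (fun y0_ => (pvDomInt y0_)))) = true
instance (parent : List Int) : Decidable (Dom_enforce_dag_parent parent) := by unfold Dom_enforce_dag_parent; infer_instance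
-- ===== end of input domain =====

-- B replaces A's mutating tri-state recursive DFS by an iterative walk that only READS the
-- parent array: it collects the current chain into a path list and an on-path set, records an
-- optional cut point, and applies the cut and the done-marking afterwards; A copies the input
-- list first, so neither version mutates the caller's argument.

-- ===== PORT A =====
-- recursive dfs of A; fuel bounds the recursion depth (each recursive call enters a node whose
-- state is 0 and first sets it to 1, so the depth is at most n and fuel n suffices)
def dfsA : Nat → Nat → List Int → List Int → List Int × List Int
  | 0, _, parent, state => (parent, state)
  | fuel+1, u, parent, state =>
    let state := state.set u 1
    let p := parent.getD u 0
    let r :=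
      if 0 ≤ p then
        if state.getD p.toNat 0 = 0 then dfsA fuel p.toNat parent state
        else if state.getD p.toNat 0 = 1 then (parent.set u (-1), state)
        else (parent, state)
      else (parent, state)
    (r.1, r.2.set u 2)

def enforce_dag_parent (parent : List Int) : List Int :=
  let n := parent.length
  let r := (List.range n).foldl
    (fun (ps : List Int × List Int) u =>
      if ps.2.getD u 0 = 0 then dfsA n u ps.1 ps.2 else ps)
    (parent, List.replicate n (0 : Int))
  r.1

-- ===== PORT B =====
-- the read-only chain walk of B: returns the collected path and the optional cut node;
-- fuel bounds the number of iterations as in dfsA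
def walkB (res : List Int) : Nat → Nat → PySem.Set Nat → PySem.Set Nat → List Nat → List Nat × Option Nat
  | 0, _, _, _, path => (path, none)
  | fuel+1, v, onpath, done, path =>
    let path := path ++ [v]
    let onpath := onpath.add v
    let p := res.getD v 0
    if p < 0 then (path, none)
    else if onpath.contains p.toNat then (path, some v)
    else if done.contains p.toNat then (path, none)
    else walkB res fuel p.toNat onpath done path

def enforce_dag_parent_alt (parent : List Int) : List Int :=
  let n := parent.length
  let r := (List.range n).foldl
    (fun (rd : List Int × PySem.Set Nat) u =>
      if rd.2.contains u then rd
      else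
        let w := walkB rd.1 n u PySem.Set.empty rd.2 []
        let res := match w.2 with
          | some c => rd.1.set c (-1)
          | none => rd.1
        (res, rd.2.update w.1))
    (parent, PySem.Set.empty)
  r.1

-- ===== PRECONDITION & SPEC =====
-- Pre_ excludes exactly the inputs on which Python A raises IndexError: a non-negative parent
-- entry ≥ len(parent) (B raises the same IndexError there, one step later).
def Pre_enforce_dag_parent (parent : List Int) : Prop :=
  ∀ p ∈ parent, p < (parent.length : Int)
instance (parent : List Int) : Decidable (Pre_enforce_dag_parent parent) := by
  unfold Pre_enforce_dag_parent; infer_instance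

def pvWitness_enforce_dag_parent : List Int := [1, 2, 0, -1]

def Spec_enforce_dag_parent (parent : List Int) (out : List Int) : Prop := out = enforce_dag_parent_alt parent
instance (parent : List Int) (out : List Int) : Decidable (Spec_enforce_dag_parent parent out) := by unfold Spec_enforce_dag_parent; infer_instance

-- ===== CLAIM (what is proved, stated in full; the proofs are below) =====
def Claim_equal_enforce_dag_parent : Prop := ∀ (parent : List Int), Dom_enforce_dag_parent parent → Pre_enforce_dag_parent parent → Spec_enforce_dag_parent parent (enforce_dag_parent parent)

-- ===== LEMMAS AND PROOFS =====

-- mark every node of `path` done (state 2)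
def setAll2 (st : List Int) (path : List Nat) : List Int :=
  path.foldl (fun (s : List Int) w => s.set w 2) st

-- the state list st realises the pair of sets (onpath O, done D)
def relSt (st : List Int) (O D : PySem.Set Nat) : Prop :=
  ∀ x : Nat, st.getD x 0 = (if O.contains x then (1:Int) else if D.contains x then 2 else 0)

lemma set_contains_iff (s : PySem.Set Nat) (x : Nat) : s.contains x = true ↔ x ∈ s := by
  simp [PySem.Set.contains]

lemma getD_set_self (l : List Int) (i : Nat) (a b : Int) (h : i < l.length) :
    (l.set i a).getD i b = a := by
  rw [List.getD_eq_getElem _ _ (by simpa using h)]; simp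

lemma getD_set_ne (l : List Int) (i j : Nat) (a b : Int) (h : i ≠ j) :
    (l.set i a).getD j b = l.getD j b := by
  simp [List.getD, List.getElem?_set_ne h]

-- setting a node to 2 commutes out of the done-marking fold
lemma setAll2_set2 (path : List Nat) (st : List Int) (u : Nat) :
    setAll2 (st.set u 2) path = (setAll2 st path).set u 2 := by
  induction path generalizing st with
  | nil => rfl
  | cons w ws ih =>
    simp only [setAll2, List.foldl_cons] at *
    by_cases h : u = w
    · subst h; rw [List.set_set, ih, List.set_set]
    · rw [List.set_comm _ _ h, ih]

-- an initial set of u is irrelevant once u is finally set to 2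
lemma setAll2_set_any (path : List Nat) (st : List Int) (u : Nat) (a : Int) :
    (setAll2 (st.set u a) path).set u 2 = (setAll2 st path).set u 2 := by
  induction path generalizing st with
  | nil => simp [setAll2, List.set_set]
  | cons w ws ih =>
    simp only [setAll2, List.foldl_cons] at *
    by_cases h : u = w
    · subst h; rw [List.set_set]
    · rw [List.set_comm _ _ h, ih]

lemma length_setAll2 (path : List Nat) (st : List Int) :
    (setAll2 st path).length = st.length := by
  induction path generalizing st with
  | nil => rfl
  | cons w ws ih =>
    simp only [setAll2, List.foldl_cons] at *
    rw [ih]; simp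

lemma getD_setAll2 (path : List Nat) (st : List Int) (x : Nat)
    (hlt : ∀ w ∈ path, w < st.length) :
    (setAll2 st path).getD x 0 = if x ∈ path then 2 else st.getD x 0 := by
  induction path generalizing st with
  | nil => simp [setAll2]
  | cons w ws ih =>
    have hw : w < st.length := hlt w (by simp)
    simp only [setAll2, List.foldl_cons] at *
    rw [ih (st.set w 2) (fun w' hw' => by simpa using hlt w' (by simp [hw']))]
    by_cases hx : x ∈ ws
    · simp [hx]
    · by_cases hxw : x = w
      · subst hxw
        rw [if_neg hx, getD_set_self _ _ _ _ hw, if_pos (List.mem_cons_self)]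
      · rw [if_neg hx, getD_set_ne _ _ _ _ _ (fun h => hxw h.symm),
          if_neg (by simp [hx, hxw])]

-- the accumulated path is just prepended to what the walk from an empty path produces
lemma walkB_path (res : List Int) (fuel : Nat) (v : Nat) (O D : PySem.Set Nat) (path : List Nat) :
    walkB res fuel v O D path =
      (path ++ (walkB res fuel v O D []).1, (walkB res fuel v O D []).2) := by
  induction fuel generalizing v O D path with
  | zero => simp [walkB]
  | succ f ih =>
    simp only [walkB, List.nil_append]
    by_cases h1 : res.getD v 0 < 0
    · rw [if_pos h1, if_pos h1]
    · rw [if_neg h1, if_neg h1]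
      by_cases h2 : (O.add v).contains (res.getD v 0).toNat = true
      · rw [if_pos h2, if_pos h2]
      · rw [if_neg h2, if_neg h2]
        by_cases h3 : D.contains (res.getD v 0).toNat = true
        · rw [if_pos h3, if_pos h3]
        · rw [if_neg h3, if_neg h3,
            ih ((res.getD v 0).toNat) (O.add v) D (path ++ [v]),
            ih ((res.getD v 0).toNat) (O.add v) D [v]]
          simp

-- one DFS call of A equals one read-only chain walk of B followed by the deferred cut and the
-- done-marking of the path; it also keeps every path node in range
lemma dfsA_eq_walkB (fuel : Nat) (v : Nat) (pa st : List Int) (O D : PySem.Set Nat)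
    (hlen : st.length = pa.length) (hv : v < pa.length)
    (hpre : ∀ p ∈ pa, p < (pa.length : Int))
    (hrel : relSt st O D) :
    dfsA fuel v pa st =
      ((match (walkB pa fuel v O D []).2 with
        | some c => pa.set c (-1)
        | none => pa),
       setAll2 st (walkB pa fuel v O D []).1)
    ∧ (∀ w ∈ (walkB pa fuel v O D []).1, w < pa.length) := by
  induction fuel generalizing v st O D with
  | zero =>
    constructor
    · simp [dfsA, walkB, setAll2]
    · simp [walkB]
  | succ f ih =>
    have hvst : v < st.length := by omega
    have hrel1 : relSt (st.set v 1) (O.add v) D := by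
      intro x
      by_cases hxv : x = v
      · subst hxv
        rw [getD_set_self _ _ _ _ hvst,
          if_pos ((set_contains_iff _ _).2 ((PySem.Set.mem_add O x x).2 (Or.inr rfl)))]
      · rw [getD_set_ne _ _ _ _ _ (fun h => hxv h.symm), hrel x]
        have : (O.add v).contains x = O.contains x := by
          by_cases hm : x ∈ O
          · simp [hm, PySem.Set.mem_add]
          · simp [hm, PySem.Set.mem_add, hxv]
        rw [this]
    by_cases hp : pa.getD v 0 < 0
    · -- parent pointer negative: both stop
      have hwB : walkB pa (f+1) v O D [] = ([v], none) := by
        simp only [walkB, List.nil_append]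
        rw [if_pos hp]
      rw [hwB]
      constructor
      · simp only [dfsA]
        rw [if_neg (by omega : ¬ (0:Int) ≤ pa.getD v 0)]
        simp [setAll2, List.set_set]
      · simpa using hv
    · have hp0 : (0:Int) ≤ pa.getD v 0 := by omega
      have hpmem : pa.getD v 0 ∈ pa := by
        rw [List.getD_eq_getElem _ _ (by simpa using hv)]
        exact List.getElem_mem _
      have hplt : (pa.getD v 0).toNat < pa.length := by
        have := hpre _ hpmem; omega
      by_cases hOn : (O.add v).contains (pa.getD v 0).toNat = true
      · -- back edge into the current path: cut here
        have hval : (st.set v 1).getD (pa.getD v 0).toNat 0 = 1 := by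
          rw [hrel1 _, if_pos hOn]
        have hwB : walkB pa (f+1) v O D [] = ([v], some v) := by
          simp only [walkB, List.nil_append]
          rw [if_neg hp, if_pos hOn]
        rw [hwB]
        constructor
        · simp only [dfsA]
          rw [if_pos hp0, if_neg (by rw [hval]; norm_num), if_pos hval]
          simp [setAll2, List.set_set]
        · simpa using hv
      · by_cases hD : D.contains (pa.getD v 0).toNat = true
        · -- chain reaches an already finished node: both stop
          have hval : (st.set v 1).getD (pa.getD v 0).toNat 0 = 2 := by
            rw [hrel1 _, if_neg hOn, if_pos hD]
          have hwB : walkB pa (f+1) v O D [] = ([v], none) := by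
            simp only [walkB, List.nil_append]
            rw [if_neg hp, if_neg hOn, if_pos hD]
          rw [hwB]
          constructor
          · simp only [dfsA]
            rw [if_pos hp0, if_neg (by rw [hval]; norm_num),
              if_neg (by rw [hval]; norm_num)]
            simp [setAll2, List.set_set]
          · simpa using hv
        · -- unseen parent: both continue down the chain
          have hval : (st.set v 1).getD (pa.getD v 0).toNat 0 = 0 := by
            rw [hrel1 _, if_neg hOn, if_neg hD]
          have hIH := ih (pa.getD v 0).toNat (st.set v 1) (O.add v) D
            (by simpa using hlen) hplt hrel1
          have hwB : walkB pa (f+1) v O D [] =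
              (v :: (walkB pa f (pa.getD v 0).toNat (O.add v) D []).1,
               (walkB pa f (pa.getD v 0).toNat (O.add v) D []).2) := by
            simp only [walkB, List.nil_append]
            rw [if_neg hp, if_neg hOn, if_neg hD,
              walkB_path pa f (pa.getD v 0).toNat (O.add v) D [v]]
            simp
          rw [hwB]
          constructor
          · simp only [dfsA]
            rw [if_pos hp0, if_pos hval, hIH.1]
            refine Prod.ext rfl ?_
            show (setAll2 (st.set v 1) _).set v 2 = setAll2 st (v :: _)
            rw [setAll2_set_any]
            show _ = setAll2 (st.set v 2) _
            rw [setAll2_set2]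
          · intro w hw
            simp only [List.mem_cons] at hw
            rcases hw with rfl | hw
            · exact hv
            · exact hIH.2 w hw

-- the two top-level folds stay in lock-step: same parent list, and the done set mirrors the
-- state-2 entries of A's state list
lemma fold_eq (n : Nat) (l : List Nat) (pa st : List Int) (D : PySem.Set Nat)
    (hn : pa.length = n) (hlen : st.length = n) (hl : ∀ u ∈ l, u < n)
    (hpre : ∀ p ∈ pa, p < (n : Int)) (hrel : relSt st PySem.Set.empty D) :
    (l.foldl (fun (ps : List Int × List Int) u =>
        if ps.2.getD u 0 = 0 then dfsA n u ps.1 ps.2 else ps) (pa, st)).1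
    = (l.foldl (fun (rd : List Int × PySem.Set Nat) u =>
        if rd.2.contains u then rd
        else
          let w := walkB rd.1 n u PySem.Set.empty rd.2 []
          let res := match w.2 with
            | some c => rd.1.set c (-1)
            | none => rd.1
          (res, rd.2.update w.1)) (pa, D)).1 := by
  induction l generalizing pa st D with
  | nil => rfl
  | cons u us ih =>
    have hu : u < n := hl u (by simp)
    have hus : ∀ u' ∈ us, u' < n := fun u' h => hl u' (by simp [h])
    simp only [List.foldl_cons]
    by_cases hD : D.contains u
    · have hst : st.getD u 0 = 2 := by
        rw [hrel u, if_pos hD]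
        simp [PySem.Set.contains, PySem.Set.empty]
      rw [if_neg (by rw [hst]; norm_num), if_pos hD]
      exact ih pa st D hn hlen hus hpre hrel
    · have hst : st.getD u 0 = 0 := by
        rw [hrel u, if_neg hD]
        simp [PySem.Set.contains, PySem.Set.empty]
      rw [if_pos hst, if_neg hD]
      have hkey := dfsA_eq_walkB n u pa st PySem.Set.empty D (by omega) (by omega) (by rw [hn]; exact hpre) hrel
      rw [hkey.1]
      set w := walkB pa n u PySem.Set.empty D [] with hw
      have hbnd : ∀ x ∈ w.1, x < n := by intro x hx; have := hkey.2 x hx; omega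
      set pa' : List Int := (match w.2 with | some c => pa.set c (-1) | none => pa) with hpa'
      have hlen' : pa'.length = n := by
        rw [hpa']; cases w.2 <;> simp [hn]
      have hpre' : ∀ p ∈ pa', p < (n : Int) := by
        intro q hq
        rw [hpa'] at hq
        cases hw2 : w.2 with
        | none => rw [hw2] at hq; exact hpre q hq
        | some c =>
          rw [hw2] at hq
          rcases List.mem_or_eq_of_mem_set hq with h | rfl
          · exact hpre q h
          · omega
      have hrel' : relSt (setAll2 st w.1) PySem.Set.empty (D.update w.1) := by
        intro x
        rw [getD_setAll2 _ _ _ (by intro y hy; rw [hlen]; exact hbnd y hy)]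
        have hcontU : (D.update w.1).contains x = (D.contains x || decide (x ∈ w.1)) := by
          by_cases h1 : x ∈ D
          · simp [PySem.Set.mem_update, h1]
          · by_cases h2 : x ∈ w.1
            · simp [PySem.Set.mem_update, h1, h2]
            · simp [PySem.Set.mem_update, h1, h2]
        simp only [show (PySem.Set.empty : PySem.Set Nat).contains x = false from rfl,
          Bool.false_eq_true, if_false, hcontU]
        by_cases h2 : x ∈ w.1
        · simp [h2]
        · rw [if_neg h2, hrel x]
          simp only [show (PySem.Set.empty : PySem.Set Nat).contains x = false from rfl,
            Bool.false_eq_true, if_false]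
          simp [h2]
      have := ih pa' (setAll2 st w.1) (D.update w.1) hlen' (by rw [length_setAll2, hlen]) hus hpre' hrel'
      exact this

-- ===== VERDICT (by name: the statement is the Claim_ definition above) =====
theorem enforce_dag_parent_spec : Claim_equal_enforce_dag_parent := by
  intro parent _ hpre
  unfold Spec_enforce_dag_parent enforce_dag_parent enforce_dag_parent_alt
  exact fold_eq parent.length (List.range parent.length) parent
    (List.replicate parent.length 0) PySem.Set.empty rfl (by simp)
    (fun u h => List.mem_range.1 h) hpre
    (by
      intro x
      simp only [show (PySem.Set.empty : PySem.Set Nat).contains x = false from rfl,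
        Bool.false_eq_true, if_false]
      rcases lt_or_ge x parent.length with h | h
      · rw [List.getD_eq_getElem _ _ (by simpa using h)]; simp
      · rw [List.getD_eq_default _ _ (by simpa using h)])
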